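-- pv_equiv track=rewrite | github.com/17wadeche/heijunka-dev | heijunka_new_layout.py | _find_sheet_by_hint
-- ===== SOURCE A (Python) =====
-- from typing import Dict, List, Tuple, Optional, Any, Iterable
--
-- def _find_sheet_by_hint(sheet_names: List[str], hint: str) -> str:
--     exact = [nm for nm in sheet_names if nm.strip().lower() == hint.strip().lower()]
--     if exact:
--         return exact[0]
--     contains = [nm for nm in sheet_names if hint.lower() in nm.lower()]
--     if contains:
--         return contains[0]
--     raise ValueError(f"Sheet '{hint}' not found. Available: {sheet_names}")
-- ===== SOURCE B (Python) =====
-- def _find_sheet_by_hint(sheet_names, hint):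
--     target = hint.strip().lower()
--     sub = hint.lower()
--     first_contains = None
--     for nm in sheet_names:
--         if nm.strip().lower() == target:
--             return nm
--         if first_contains is None and sub in nm.lower():
--             first_contains = nm
--     if first_contains is not None:
--         return first_contains
--     raise ValueError(f"Sheet '{hint}' not found. Available: {sheet_names}")
-- ===== Notes on version B (the rewrite author's own statement) =====
-- stated objective: alternative
-- what changed: Fuses A's two full list comprehensions into a single loop that returns at the first exact match and tracks the first substring candidate in one variable.
import Mathlib
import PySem

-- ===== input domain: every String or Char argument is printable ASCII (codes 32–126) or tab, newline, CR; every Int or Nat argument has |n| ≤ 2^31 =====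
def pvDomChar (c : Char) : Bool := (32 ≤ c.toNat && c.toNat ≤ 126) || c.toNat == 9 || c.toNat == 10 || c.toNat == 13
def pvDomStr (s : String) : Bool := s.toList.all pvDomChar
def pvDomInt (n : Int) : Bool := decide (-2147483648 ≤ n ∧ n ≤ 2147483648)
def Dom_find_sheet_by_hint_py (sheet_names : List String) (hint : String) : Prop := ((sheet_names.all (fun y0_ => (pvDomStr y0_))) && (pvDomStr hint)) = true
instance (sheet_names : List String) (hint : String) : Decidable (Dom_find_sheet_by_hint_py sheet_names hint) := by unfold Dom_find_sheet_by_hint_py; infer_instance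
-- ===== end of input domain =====

-- B fuses A's two list comprehensions into a single early-exit pass; the raise (no match) is excluded by Pre_.

-- ===== PORT A =====
-- exact-match test: nm.strip().lower() == hint.strip().lower()
def pvExact (hint nm : String) : Bool :=
  PySem.Str.lower (PySem.Str.strip nm) == PySem.Str.lower (PySem.Str.strip hint)

-- substring test: hint.lower() in nm.lower()
def pvContains (hint nm : String) : Bool :=
  PySem.Str.isIn (PySem.Str.lower hint) (PySem.Str.lower nm)

def find_sheet_by_hint_py (sheet_names : List String) (hint : String) : String :=
  let exact := sheet_names.filter (fun nm => pvExact hint nm)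
  match exact with
  | nm :: _ => nm
  | [] =>
    let contains := sheet_names.filter (fun nm => pvContains hint nm)
    match contains with
    | nm :: _ => nm
    | [] => ""  -- Python raises ValueError here; excluded by Pre_

-- ===== PORT B =====
def pvLoopB (hint : String) : List String → Option String → String
  | [], firstContains =>
    match firstContains with
    | some c => c
    | none => ""  -- Python raises ValueError here; excluded by Pre_
  | nm :: rest, firstContains =>
    if pvExact hint nm then nm
    else pvLoopB hint rest
      (if firstContains = none ∧ pvContains hint nm then some nm else firstContains)

def find_sheet_by_hint_py_alt (sheet_names : List String) (hint : String) : String :=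
  pvLoopB hint sheet_names none

-- ===== PRECONDITION & SPEC =====
-- Pre_ excludes exactly the inputs with no exact and no substring match, on which Python A raises ValueError.
def Pre_find_sheet_by_hint_py (sheet_names : List String) (hint : String) : Prop :=
  ∃ nm ∈ sheet_names, pvExact hint nm = true ∨ pvContains hint nm = true
instance (sheet_names : List String) (hint : String) : Decidable (Pre_find_sheet_by_hint_py sheet_names hint) := by unfold Pre_find_sheet_by_hint_py; infer_instance

def pvWitness_find_sheet_by_hint_py : List String × String := (["Heijunka Board", "Data"], "heijunka")

def Spec_find_sheet_by_hint_py (sheet_names : List String) (hint : String) (out : String) : Prop := out = find_sheet_by_hint_py_alt sheet_names hint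
instance (sheet_names : List String) (hint : String) (out : String) : Decidable (Spec_find_sheet_by_hint_py sheet_names hint out) := by unfold Spec_find_sheet_by_hint_py; infer_instance

-- ===== CLAIM (what is proved, stated in full; the proofs are below) =====
def Claim_equal_find_sheet_by_hint_py : Prop := ∀ (sheet_names : List String) (hint : String), Dom_find_sheet_by_hint_py sheet_names hint → Pre_find_sheet_by_hint_py sheet_names hint → Spec_find_sheet_by_hint_py sheet_names hint (find_sheet_by_hint_py sheet_names hint)

-- ===== LEMMAS AND PROOFS =====
-- Characterisation of B's loop: an exact match wins; otherwise the accumulator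
-- (first substring match seen so far), and only then a later substring match.
theorem pvLoopB_char (hint : String) (xs : List String) (acc : Option String) :
    pvLoopB hint xs acc =
      match xs.filter (fun nm => pvExact hint nm) with
      | nm :: _ => nm
      | [] =>
        match acc with
        | some c => c
        | none =>
          match xs.filter (fun nm => pvContains hint nm) with
          | nm :: _ => nm
          | [] => "" := by
  induction xs generalizing acc with
  | nil => cases acc <;> simp [pvLoopB]
  | cons nm rest ih =>
    by_cases he : pvExact hint nm = true
    · simp [pvLoopB, he]
    · cases acc with
      | some c => simp [pvLoopB, he, ih]
      | none =>
        by_cases hc : pvContains hint nm = true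
        · simp [pvLoopB, he, hc, ih]
        · simp [pvLoopB, he, hc, ih]

-- ===== VERDICT (by name: the statement is the Claim_ definition above) =====
theorem find_sheet_by_hint_py_spec : Claim_equal_find_sheet_by_hint_py := by
  intro sheet_names hint _ _
  unfold Spec_find_sheet_by_hint_py find_sheet_by_hint_py_alt find_sheet_by_hint_py
  rw [pvLoopB_char]
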